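-- pv_equiv track=rewrite | github.com/foggy-projects/foggy-odoo-bridge | foggy_mcp/lib/foggy/dataset_model/semantic/service.py | _normalize_string_literal_for_sql
-- ===== SOURCE A (Python) =====
-- from typing import Any, Callable, Dict, List, Optional, Tuple
--
-- def _normalize_string_literal_for_sql(raw: str) -> str:
--     """Rewrite a DSL string literal as a SQL-standard single-quoted literal.
--
--     The DSL permits both ``'...'`` and ``"..."`` string literals. The
--     inline-expression scanner (``skip_string_literal``) treats ``\\`` as
--     an escape for the following character. SQL (Postgres / MySQL /
--     SQLite with standard settings) requires string literals to be wrapped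
--     with single quotes; emitting ``"posted"`` verbatim causes Postgres to
--     interpret it as an identifier and fail with
--     ``column "posted" does not exist`` (BUG-003 v1.4).
--
--     This helper:
--       * strips the outer opening/closing quote;
--       * honors ``\\`` escapes consistent with ``skip_string_literal`` so
--         ``"a\\"b"`` and ``'a\\'b'`` decode to the logical value;
--       * doubles any embedded single quote per SQL standard; and
--       * re-wraps with single quotes.
--
--     Non-quoted input is returned unchanged as a defensive fallback.
--     """
--     if len(raw) < 2 or raw[0] not in ("'", '"'):
--         return raw
--     quote = raw[0]
--     inner = raw[1:-1] if len(raw) >= 2 and raw[-1] == quote else raw[1:]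
--
--     decoded: List[str] = []
--     j = 0
--     n = len(inner)
--     while j < n:
--         c = inner[j]
--         if c == "\\" and j + 1 < n:
--             decoded.append(inner[j + 1])
--             j += 2
--         else:
--             decoded.append(c)
--             j += 1
--     value = "".join(decoded)
--     return "'" + value.replace("'", "''") + "'"
-- ===== SOURCE B (Python) =====
-- def _normalize_string_literal_for_sql(raw: str) -> str:
--     if len(raw) < 2 or raw[0] not in ("'", '"'):
--         return raw
--     inner = raw[1:-1] if raw[-1] == raw[0] else raw[1:]
--     # Decode backslash escapes by segment jumping: split on '\'; each separator
--     # escapes the first char of the following segment, so that segment is kept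
--     # verbatim; an empty segment means the escaped char was itself a backslash
--     # (or a trailing lone backslash), in which case the next segment is plain.
--     parts = inner.split("\\")
--     pieces = [parts[0]]
--     i = 1
--     while i < len(parts):
--         if parts[i]:
--             pieces.append(parts[i])
--         else:
--             pieces.append("\\")
--             if i + 1 < len(parts):
--                 pieces.append(parts[i + 1])
--                 i += 1
--         i += 1
--     value = "".join(pieces)
--     return "'" + value.replace("'", "''") + "'"
-- ===== Notes on version B (the rewrite author's own statement) =====
-- stated objective: alternative
-- what changed: Replaces A's char-by-char index-based while-loop escape decoder by a staged split/join pipeline: split the inner text on backslash, then walk the SEGMENT list (jumping a segment after an empty one, which encodes an escaped or trailing backslash) and join the kept segments; no per-character state machine remains.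
import Mathlib
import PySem

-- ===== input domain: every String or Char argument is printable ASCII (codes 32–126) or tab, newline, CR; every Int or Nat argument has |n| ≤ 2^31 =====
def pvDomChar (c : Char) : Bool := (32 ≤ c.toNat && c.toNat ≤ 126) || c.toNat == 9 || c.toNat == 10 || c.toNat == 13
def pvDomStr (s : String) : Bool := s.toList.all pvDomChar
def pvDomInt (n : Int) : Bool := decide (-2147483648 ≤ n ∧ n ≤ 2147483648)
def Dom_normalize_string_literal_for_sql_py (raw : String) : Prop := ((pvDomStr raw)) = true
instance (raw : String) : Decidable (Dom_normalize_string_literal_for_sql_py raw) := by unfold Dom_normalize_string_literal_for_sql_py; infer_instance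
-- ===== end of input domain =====

-- B replaces A's per-character index-based escape decoder by a split-on-backslash /
-- segment-jumping / join pipeline; alternative decomposition, same cost.

-- ===== PORT A =====
-- the while-loop: j indexes inner; decoded is the accumulator list
def pvDecodeA (inner : List Char) (j : Nat) (decoded : List Char) : List Char :=
  if h : j < inner.length then
    let c := inner[j]
    if h2 : c = '\\' ∧ j + 1 < inner.length then
      pvDecodeA inner (j + 2) (decoded ++ [inner[j + 1]'h2.2])
    else
      pvDecodeA inner (j + 1) (decoded ++ [c])
  else decoded
termination_by inner.length - j

def normalize_string_literal_for_sql_py (raw : String) : String :=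
  let cs := raw.toList
  if cs.length < 2 then raw
  else if ¬ (PySem.List.pyGet? cs 0 = some '\'' ∨ PySem.List.pyGet? cs 0 = some '"') then raw
  else
    -- cs is nonempty here, so the getD default is never used
    let quote : Char := (PySem.List.pyGet? cs 0).getD ' '
    let inner : List Char :=
      if cs.length ≥ 2 ∧ PySem.List.pyGet? cs (-1) = some quote then
        PySem.List.slice cs (some 1) (some (-1))
      else
        PySem.List.slice cs (some 1) none
    let value := pvDecodeA inner 0 []
    String.ofList ('\'' :: PySem.Chars.replace value ['\''] ['\'', '\''] ++ ['\''])

-- ===== PORT B =====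
-- Source B's while-loop over the segment list (pieces accumulates; an empty segment
-- emits a backslash and, when one follows, also consumes the following segment)
def pvPartsLoop : List (List Char) → List Char
  | [] => []
  | p :: rest =>
    if p = [] then
      match rest with
      | [] => ['\\']
      | q :: rest' => '\\' :: (q ++ pvPartsLoop rest')
    else p ++ pvPartsLoop rest

def normalize_string_literal_for_sql_py_alt (raw : String) : String :=
  let cs := raw.toList
  if cs.length < 2 then raw
  else if ¬ (cs[0]? = some '\'' ∨ cs[0]? = some '"') then raw
  else
    let inner : List Char := if cs.getLast? = cs[0]? then cs.tail.dropLast else cs.tail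
    let value : List Char :=
      match inner.splitOn '\\' with
      | [] => []                      -- unreachable: splitOn never returns []
      | p :: rest => p ++ pvPartsLoop rest
    String.ofList ('\'' :: PySem.Chars.replace value ['\''] ['\'', '\''] ++ ['\''])

-- ===== PRECONDITION & SPEC =====
def Spec_normalize_string_literal_for_sql_py (raw : String) (out : String) : Prop := out = normalize_string_literal_for_sql_py_alt raw
instance (raw : String) (out : String) : Decidable (Spec_normalize_string_literal_for_sql_py raw out) := by unfold Spec_normalize_string_literal_for_sql_py; infer_instance

-- ===== CLAIM (what is proved, stated in full; the proofs are below) =====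
def Claim_equal_normalize_string_literal_for_sql_py : Prop := ∀ (raw : String), Dom_normalize_string_literal_for_sql_py raw → Spec_normalize_string_literal_for_sql_py raw (normalize_string_literal_for_sql_py raw)

-- ===== LEMMAS AND PROOFS =====

-- reference decode: what A's while-loop computes, structurally on the list
def pvDecSpec : List Char → List Char
  | [] => []
  | [c] => [c]
  | c :: d :: rest =>
    if c = '\\' then d :: pvDecSpec rest
    else c :: pvDecSpec (d :: rest)

lemma pvDecodeA_eq (l : List Char) :
    ∀ k j acc, l.length - j ≤ k → pvDecodeA l j acc = acc ++ pvDecSpec (l.drop j) := by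
  intro k
  induction k with
  | zero =>
    intro j acc hk
    have hj : l.length ≤ j := by omega
    have hd : List.drop j l = [] := List.drop_eq_nil_of_le hj
    rw [pvDecodeA]
    simp [Nat.not_lt.mpr hj, hd, pvDecSpec]
  | succ k ih =>
    intro j acc hk
    rw [pvDecodeA]
    by_cases h : j < l.length
    · simp only [h, dif_pos]
      have hd : l.drop j = l[j] :: l.drop (j + 1) := List.drop_eq_getElem_cons h
      by_cases h2 : l[j] = '\\' ∧ j + 1 < l.length
      · have hd2 : l.drop (j + 1) = l[j + 1] :: l.drop (j + 2) := List.drop_eq_getElem_cons h2.2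
        rw [dif_pos h2, ih (j + 2) _ (by omega), hd, hd2, h2.1]
        simp [pvDecSpec]
      · rw [dif_neg h2, ih (j + 1) _ (by omega), hd]
        by_cases h3 : j + 1 < l.length
        · have hne : ¬ l[j] = '\\' := fun hc => h2 ⟨hc, h3⟩
          have hd2 : l.drop (j + 1) = l[j + 1] :: l.drop (j + 2) := List.drop_eq_getElem_cons h3
          rw [hd2]
          simp [pvDecSpec, hne]
        · have hd2 : l.drop (j + 1) = [] := List.drop_eq_nil_of_le (by omega)
          rw [hd2]
          simp [pvDecSpec]
    · have hd : List.drop j l = [] := List.drop_eq_nil_of_le (by omega)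
      simp [h, hd, pvDecSpec]

-- decSpec passes a backslash-free prefix through unchanged
lemma pvDecSpec_free : ∀ (p s : List Char), '\\' ∉ p → pvDecSpec (p ++ s) = p ++ pvDecSpec s := by
  intro p
  induction p with
  | nil => intro s _; simp
  | cons c t ih =>
    intro s hfree
    have hc : c ≠ '\\' := fun h => hfree (h ▸ List.mem_cons_self)
    have ht : '\\' ∉ t := fun h => hfree (List.mem_cons_of_mem _ h)
    cases hts : t ++ s with
    | nil =>
      obtain ⟨ht0, hs0⟩ := List.append_eq_nil_iff.mp hts
      subst ht0; subst hs0
      rfl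
    | cons d r =>
      have : pvDecSpec (c :: d :: r) = c :: pvDecSpec (d :: r) := by
        simp [pvDecSpec, hc]
      rw [List.cons_append, hts, this, ← hts, ih s ht]; rfl

-- a backslash-free list decodes to itself
lemma pvDecSpec_id (p : List Char) (hp : '\\' ∉ p) : pvDecSpec p = p := by
  have := pvDecSpec_free p [] hp
  simpa [pvDecSpec] using this

-- chunks produced by splitOnP contain no char satisfying the predicate
lemma splitOnP_chunks_free {α : Type} (pr : α → Bool) :
    ∀ (xs : List α) (q : List α), q ∈ xs.splitOnP pr → ∀ a ∈ q, ¬ pr a = true := by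
  intro xs
  induction xs with
  | nil => intro q hq a ha; simp at hq; subst hq; simp at ha
  | cons c t ih =>
    intro q hq a ha
    rw [List.splitOnP_cons] at hq
    by_cases hc : pr c
    · rw [if_pos hc] at hq
      rcases List.mem_cons.mp hq with h | h
      · subst h; simp at ha
      · exact ih q h a ha
    · rw [if_neg hc] at hq
      obtain ⟨h0, tl, hsp⟩ := List.exists_cons_of_ne_nil (List.splitOnP_ne_nil pr t)
      rw [hsp] at hq
      simp only [List.modifyHead_cons] at hq
      rcases List.mem_cons.mp hq with h | h
      · subst h
        rcases List.mem_cons.mp ha with h | h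
        · subst h; exact hc
        · exact ih h0 (hsp ▸ List.mem_cons_self) a h
      · exact ih q (hsp ▸ List.mem_cons_of_mem _ h) a ha

lemma intercalate_single {α : Type} (x : α) (a : List α) :
    List.intercalate [x] [a] = a := by
  simp [List.intercalate]

lemma intercalate_cons2 {α : Type} (x : α) (a b : List α) (t : List (List α)) :
    List.intercalate [x] (a :: b :: t) = a ++ x :: List.intercalate [x] (b :: t) := by
  simp [List.intercalate, List.intersperse]

-- the central pair: decSpec of the re-joined segments equals the segment walk
lemma dec_split (n : Nat) : ∀ (p : List Char) (rest : List (List Char)), rest.length ≤ n →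
    '\\' ∉ p → (∀ q ∈ rest, '\\' ∉ q) →
    (pvDecSpec (List.intercalate ['\\'] (p :: rest)) = p ++ pvPartsLoop rest) ∧
    (pvDecSpec ('\\' :: List.intercalate ['\\'] (p :: rest)) = pvPartsLoop (p :: rest)) := by
  induction n with
  | zero =>
    intro p rest hlen hp _
    have hr : rest = [] := List.eq_nil_of_length_eq_zero (by omega)
    subst hr
    constructor
    · rw [intercalate_single, pvDecSpec_id p hp]
      simp [pvPartsLoop]
    · rw [intercalate_single]
      cases p with
      | nil => simp [pvDecSpec, pvPartsLoop]
      | cons c t =>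
        have hc : c ≠ '\\' := fun h => hp (h ▸ List.mem_cons_self)
        have h1 : pvDecSpec ('\\' :: c :: t) = c :: pvDecSpec t := by
          simp [pvDecSpec]
        have ht : '\\' ∉ t := fun h => hp (List.mem_cons_of_mem _ h)
        rw [h1, pvDecSpec_id t ht]
        simp [pvPartsLoop]
  | succ n ih =>
    intro p rest hlen hp hrest
    constructor
    · cases rest with
      | nil =>
        rw [intercalate_single, pvDecSpec_id p hp]
        simp [pvPartsLoop]
      | cons r rest' =>
        rw [intercalate_cons2]
        rw [pvDecSpec_free p _ hp]
        have hr : '\\' ∉ r := hrest r List.mem_cons_self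
        have hrest' : ∀ q ∈ rest', '\\' ∉ q := fun q hq => hrest q (List.mem_cons_of_mem _ hq)
        have := (ih r rest' (by simpa using Nat.lt_succ_iff.mp (by simpa using hlen)) hr hrest').2
        rw [this]
    · cases p with
      | nil =>
        cases rest with
        | nil =>
          rw [intercalate_single]
          simp [pvDecSpec, pvPartsLoop]
        | cons r rest' =>
          rw [intercalate_cons2]
          have hr : '\\' ∉ r := hrest r List.mem_cons_self
          have hrest' : ∀ q ∈ rest', '\\' ∉ q := fun q hq => hrest q (List.mem_cons_of_mem _ hq)
          have hA := (ih r rest' (by simpa using Nat.lt_succ_iff.mp (by simpa using hlen)) hr hrest').1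
          have : pvDecSpec ('\\' :: '\\' :: List.intercalate ['\\'] (r :: rest'))
              = '\\' :: pvDecSpec (List.intercalate ['\\'] (r :: rest')) := by
            simp [pvDecSpec]
          simp only [List.nil_append, this, hA]
          simp [pvPartsLoop]
      | cons c p' =>
        have hc : c ≠ '\\' := fun h => hp (h ▸ List.mem_cons_self)
        have hp' : '\\' ∉ p' := fun h => hp (List.mem_cons_of_mem _ h)
        cases rest with
        | nil =>
          rw [intercalate_single]
          have h1 : pvDecSpec ('\\' :: c :: p') = c :: pvDecSpec p' := by
            simp [pvDecSpec]
          rw [h1, pvDecSpec_id p' hp']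
          simp [pvPartsLoop]
        | cons r rest' =>
          rw [intercalate_cons2]
          have hr : '\\' ∉ r := hrest r List.mem_cons_self
          have hrest' : ∀ q ∈ rest', '\\' ∉ q := fun q hq => hrest q (List.mem_cons_of_mem _ hq)
          have hB := (ih r rest' (by simpa using Nat.lt_succ_iff.mp (by simpa using hlen)) hr hrest').2
          have h1 : pvDecSpec ('\\' :: c :: (p' ++ '\\' :: List.intercalate ['\\'] (r :: rest')))
              = c :: pvDecSpec (p' ++ '\\' :: List.intercalate ['\\'] (r :: rest')) := by
            simp [pvDecSpec]
          simp only [List.cons_append, h1, pvDecSpec_free p' _ hp', hB]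
          simp [pvPartsLoop]

-- A's decoded value equals B's segment-walk value
lemma value_eq (inner : List Char) :
    pvDecodeA inner 0 [] =
      (match inner.splitOn '\\' with
       | [] => []
       | p :: rest => p ++ pvPartsLoop rest) := by
  rw [pvDecodeA_eq inner inner.length 0 [] (by omega)]
  simp only [List.drop_zero, List.nil_append]
  obtain ⟨p, rest, hsp⟩ := List.exists_cons_of_ne_nil
    (show inner.splitOn '\\' ≠ [] from List.splitOnP_ne_nil _ inner)
  have hinter : List.intercalate ['\\'] (p :: rest) = inner := by
    rw [← hsp]; exact List.intercalate_splitOn inner '\\'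
  have hfree : ∀ q ∈ p :: rest, '\\' ∉ q := by
    intro q hq hmem
    have hsp' : inner.splitOnP (· == '\\') = p :: rest := hsp
    exact splitOnP_chunks_free (· == '\\') inner q (hsp' ▸ hq) '\\' hmem (by simp)
  rw [hsp, ← hinter]
  exact (dec_split rest.length p rest (le_refl _)
    (hfree p List.mem_cons_self) (fun q hq => hfree q (List.mem_cons_of_mem _ hq))).1

lemma slice_one_neg_one (cs : List Char) (h : 2 ≤ cs.length) :
    PySem.List.slice cs (some 1) (some (-1)) = cs.tail.dropLast := by
  have hne : cs ≠ [] := by intro h0; simp [h0] at h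
  have ha : PySem.List.clampIdx cs.length 1 = 1 := by
    simp [PySem.List.clampIdx]; omega
  have hb : PySem.List.clampIdx cs.length (-1) = cs.length - 1 := by
    simp [PySem.List.clampIdx, hne]; omega
  simp only [PySem.List.slice, ha, hb, List.dropLast_eq_take, ← List.drop_one,
    List.length_drop]

-- ===== VERDICT (by name: the statement is the Claim_ definition above) =====
theorem normalize_string_literal_for_sql_py_spec : Claim_equal_normalize_string_literal_for_sql_py := by
  intro raw _
  unfold Spec_normalize_string_literal_for_sql_py
  unfold normalize_string_literal_for_sql_py normalize_string_literal_for_sql_py_alt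
  set cs := raw.toList with hcs
  by_cases hlen : cs.length < 2
  · simp [hlen]
  · simp only [hlen, if_false]
    have hpg : PySem.List.pyGet? cs 0 = cs[0]? := PySem.List.pyGet?_zero cs
    rw [hpg]
    by_cases hq : cs[0]? = some '\'' ∨ cs[0]? = some '"'
    · rw [if_neg (not_not_intro hq), if_neg (not_not_intro hq)]
      obtain ⟨q, hq0⟩ : ∃ q, cs[0]? = some q := by
        rcases hq with h | h <;> exact ⟨_, h⟩
      have hql : (cs[0]?.getD ' ') = q := by rw [hq0]; rfl
      have hlast : PySem.List.pyGet? cs (-1) = cs.getLast? := PySem.List.pyGet?_neg_one cs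
      have hcond : (cs.length ≥ 2 ∧ PySem.List.pyGet? cs (-1) = some (cs[0]?.getD ' '))
          ↔ (cs.getLast? = cs[0]?) := by
        rw [hql, hlast, hq0]
        constructor
        · exact fun h => h.2
        · exact fun h => ⟨by omega, h⟩
      by_cases hc : cs.getLast? = cs[0]?
      · rw [if_pos (hcond.mpr hc), if_pos hc, slice_one_neg_one cs (by omega), value_eq]
      · rw [if_neg (fun h => hc (hcond.mp h)), if_neg hc,
          PySem.List.slice_from_one, value_eq]
    · rw [if_pos hq, if_pos hq]
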